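-- pv_equiv track=rewrite | github.com/seddonym/import-linter | src/importlinter/contracts/tree.py | _get_module_ancestors
-- ===== SOURCE A (Python) =====
-- def _get_module_ancestors(module: str) -> list[str]:
--     module_ancestors = []
--     module_split = module.split(".")
--     del module_split[-1]
--
--     while module_split:
--         module_ancestors.append(".".join(module_split))
--         del module_split[-1]
--
--     return module_ancestors
-- ===== SOURCE B (Python) =====
-- def _get_module_ancestors(module: str) -> list[str]:
--     dot_indices = [i for i, ch in enumerate(module) if ch == "."]
--     return [module[:i] for i in reversed(dot_indices)]
-- ===== Notes on version B (the rewrite author's own statement) =====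
-- stated objective: alternative
-- what changed: Instead of splitting into segments and repeatedly re-joining a shrinking list, B scans the string once for the positions of the dot separators and slices each ancestor prefix directly from the original string, longest first.
import Mathlib
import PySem

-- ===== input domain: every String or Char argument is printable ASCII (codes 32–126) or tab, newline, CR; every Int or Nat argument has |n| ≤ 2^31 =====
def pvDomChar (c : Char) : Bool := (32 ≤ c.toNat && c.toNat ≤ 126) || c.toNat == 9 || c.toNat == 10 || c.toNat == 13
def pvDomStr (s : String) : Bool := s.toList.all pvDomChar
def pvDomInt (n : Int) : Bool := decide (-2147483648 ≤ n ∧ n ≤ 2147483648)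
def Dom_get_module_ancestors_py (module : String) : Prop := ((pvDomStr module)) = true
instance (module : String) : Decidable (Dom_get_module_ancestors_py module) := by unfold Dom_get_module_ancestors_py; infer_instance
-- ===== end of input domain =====

-- B scans the string once for the indices of '.' and slices each ancestor prefix directly,
-- instead of A's split-into-segments with repeated re-join of a shrinking list (objective: alternative).

-- ===== PORT A =====
-- the while loop: append ".".join(module_split); del module_split[-1]
def pvALoop : List String → List String
  | [] => []
  | x :: xs => PySem.Str.join "." (x :: xs) :: pvALoop (x :: xs).dropLast
termination_by l => l.length
decreasing_by simp [List.length_dropLast]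

def get_module_ancestors_py (module : String) : List String :=
  let module_split := (PySem.Chars.splitOn module.toList ".".toList).map String.ofList
  pvALoop module_split.dropLast

-- ===== PORT B =====
def get_module_ancestors_py_alt (module : String) : List String :=
  let dot_indices :=
    ((PySem.List.enumerate module.toList 0).filter (fun p => p.2 == '.')).map (fun p => p.1)
  dot_indices.reverse.map (fun i => PySem.Str.slice module none (some i))

-- ===== PRECONDITION & SPEC =====
def Spec_get_module_ancestors_py (module : String) (out : List String) : Prop := out = get_module_ancestors_py_alt module
instance (module : String) (out : List String) : Decidable (Spec_get_module_ancestors_py module out) := by unfold Spec_get_module_ancestors_py; infer_instance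

-- ===== CLAIM (what is proved, stated in full; the proofs are below) =====
def Claim_equal_get_module_ancestors_py : Prop := ∀ (module : String), Dom_get_module_ancestors_py module → Spec_get_module_ancestors_py module (get_module_ancestors_py module)

-- ===== LEMMAS AND PROOFS =====

-- (pvSpl cs).1 is the first '.'-separated segment of cs, (pvSpl cs).2 the remaining segments
def pvSpl : List Char → List Char × List (List Char)
  | [] => ([], [])
  | c :: r => let p := pvSpl r; if c = '.' then ([], p.1 :: p.2) else (c :: p.1, p.2)

-- the positions of the '.' characters in cs
def pvDots : List Char → List Nat
  | [] => []
  | c :: r => if c = '.' then 0 :: (pvDots r).map (· + 1) else (pvDots r).map (· + 1)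

theorem go_char (l : List Char) : ∀ (fuel : Nat) (cur : List Char) (acc : List (List Char)),
    l.length < fuel →
    PySem.Chars.splitOn.go ['.'] fuel l cur acc
      = acc.reverse ++ ((cur.reverse ++ (pvSpl l).1) :: (pvSpl l).2) := by
  induction l with
  | nil =>
    intro fuel cur acc h
    match fuel, h with
    | fuel+1, _ => simp [PySem.Chars.splitOn.go, pvSpl]
  | cons c r ih =>
    intro fuel cur acc h
    match fuel, h with
    | fuel+1, h =>
      simp only [PySem.Chars.splitOn.go]
      by_cases hc : c = '.'
      · subst hc
        rw [if_pos (by simp [List.isPrefixOf])]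
        simp only [List.length_cons, List.length_nil, List.drop_succ_cons, List.drop_zero]
        rw [ih fuel [] _ (by simpa using h)]
        simp [pvSpl]
      · rw [if_neg (by simp [List.isPrefixOf]; exact fun hh => hc hh.symm)]
        rw [ih fuel (c :: cur) acc (by simpa using h)]
        simp [pvSpl, hc]

theorem splitOn_char (cs : List Char) :
    PySem.Chars.splitOn cs ['.'] = (pvSpl cs).1 :: (pvSpl cs).2 := by
  unfold PySem.Chars.splitOn
  rw [go_char cs (cs.length+1) [] [] (by omega)]
  simp

theorem pvSpl_dot (r : List Char) : pvSpl ('.' :: r) = ([], (pvSpl r).1 :: (pvSpl r).2) := by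
  simp [pvSpl]

theorem pvSpl_ne {c : Char} (hc : ¬ c = '.') (r : List Char) :
    pvSpl (c :: r) = (c :: (pvSpl r).1, (pvSpl r).2) := by
  simp [pvSpl, hc]

theorem pvDots_dot (r : List Char) : pvDots ('.' :: r) = 0 :: (pvDots r).map (· + 1) := by
  simp [pvDots]

theorem pvDots_ne {c : Char} (hc : ¬ c = '.') (r : List Char) :
    pvDots (c :: r) = (pvDots r).map (· + 1) := by
  simp [pvDots, hc]

theorem pvDots_length (cs : List Char) : (pvDots cs).length = (pvSpl cs).2.length := by
  induction cs with
  | nil => simp [pvDots, pvSpl]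
  | cons c r ih =>
    by_cases hc : c = '.' <;> simp [pvDots, pvSpl, hc, ih]

theorem join_cons_head (sep h : List Char) (c : Char) (t : List (List Char)) :
    PySem.Chars.join sep ((c :: h) :: t) = c :: PySem.Chars.join sep (h :: t) := by
  cases t with
  | nil => simp [PySem.Chars.join_singleton]
  | cons b t' => simp [PySem.Chars.join_cons_cons]

theorem getD_map_succ (l : List Nat) (j : Nat) (hj : j < l.length) :
    (l.map (· + 1)).getD j 0 = l.getD j 0 + 1 := by
  rw [List.getD_eq_getElem _ _ (by simpa using hj), List.getD_eq_getElem _ _ hj, List.getElem_map]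

-- joining the first k+1 segments gives the prefix of cs up to the (k+1)-th dot
theorem join_take_dot (cs : List Char) : ∀ (k : Nat), k < (pvDots cs).length →
    PySem.Chars.join ['.'] (((pvSpl cs).1 :: (pvSpl cs).2).take (k + 1))
      = cs.take ((pvDots cs).getD k 0) := by
  induction cs with
  | nil => simp [pvDots]
  | cons c r ih =>
    intro k hk
    by_cases hc : c = '.'
    · subst hc
      rw [pvSpl_dot, pvDots_dot] at *
      cases k with
      | zero => simp [PySem.Chars.join_singleton]
      | succ j =>
        simp only [List.length_cons, Nat.succ_lt_succ_iff, List.length_map] at hk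
        have hj := ih j hk
        simp only [List.getD_cons_succ]
        rw [getD_map_succ _ _ hk]
        have htake : ((pvSpl r).1 :: (pvSpl r).2).take (j + 1) = (pvSpl r).1 :: (pvSpl r).2.take j := by
          simp
        rw [List.take_succ_cons, htake, PySem.Chars.join_cons_cons]
        rw [htake] at hj
        simp [hj]
    · rw [pvSpl_ne hc, pvDots_ne hc] at *
      simp only [List.length_map] at hk
      have hj := ih k hk
      rw [getD_map_succ _ _ hk]
      rw [List.take_succ_cons, join_cons_head]
      simp only [List.take_succ_cons] at hj
      exact congrArg (List.cons c) hj

theorem enum_dots (cs : List Char) : ∀ (s : Int),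
    ((PySem.List.enumerate cs s).filter (fun p => p.2 == '.')).map (fun p => p.1)
      = (pvDots cs).map (fun k : Nat => s + (k : Int)) := by
  induction cs with
  | nil => intro s; simp [PySem.List.enumerate_nil, pvDots]
  | cons c r ih =>
    intro s
    rw [PySem.List.enumerate_cons]
    by_cases hc : c = '.'
    · subst hc
      rw [pvDots_dot]
      simp only [List.filter_cons, beq_self_eq_true, if_pos, List.map_cons, List.map_map]
      rw [ih (s+1)]
      try simp only [List.map_map]
      refine congrArg₂ List.cons (by simp) ?_
      apply List.map_congr_left
      intro k _
      simp only [Function.comp_apply]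
      push_cast
      ring
    · rw [pvDots_ne hc]
      simp only [List.filter_cons]
      rw [if_neg (by simpa using hc)]
      rw [ih (s+1)]
      try simp only [List.map_map]
      apply List.map_congr_left
      intro k _
      simp only [Function.comp_apply]
      push_cast
      ring

-- A's while loop produces the joins of the prefixes of the segment list, longest first
theorem pvALoop_eq : ∀ (n : Nat) (l : List String), l.length = n →
    pvALoop l = (List.range n).reverse.map (fun k => PySem.Str.join "." (l.take (k + 1))) := by
  intro n
  induction n with
  | zero => intro l hl; rw [List.length_eq_zero_iff] at hl; subst hl; simp [pvALoop]
  | succ m ih =>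
    intro l hl
    match l, hl with
    | x :: xs, hl =>
      rw [pvALoop]
      have hdl : (x :: xs).dropLast.length = m := by
        have h2 := hl
        simp only [List.length_cons] at h2
        simp only [List.length_dropLast, List.length_cons]
        omega
      rw [ih _ hdl]
      rw [List.range_succ, List.reverse_append]
      simp only [List.reverse_cons, List.reverse_nil, List.nil_append, List.map_cons,
        List.singleton_append]
      refine congrArg₂ List.cons ?_ ?_
      · rw [List.take_of_length_le (by omega)]
      · apply List.map_congr_left
        intro k hk
        rw [List.mem_reverse, List.mem_range] at hk
        rw [List.dropLast_eq_take, List.take_take]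
        congr 2
        simp only [List.length_cons] at hl ⊢
        omega

theorem eq_range_map (l : List Nat) : l = (List.range l.length).map (fun k => l.getD k 0) := by
  apply List.ext_getElem (by simp)
  intro i h1 h2
  simp [List.getElem?_eq_getElem h1]

theorem join_map_ofList (xs : List (List Char)) :
    PySem.Str.join "." (xs.map String.ofList) = String.ofList (PySem.Chars.join ['.'] xs) := by
  simp [PySem.Str.join, List.map_map, Function.comp_def]

theorem ports_eq (module : String) :
    get_module_ancestors_py module = get_module_ancestors_py_alt module := by
  simp only [get_module_ancestors_py, get_module_ancestors_py_alt]
  have hdot : ".".toList = ['.'] := by decide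
  rw [hdot, splitOn_char, ← List.map_dropLast]
  have hlen : ((((pvSpl module.toList).1 :: (pvSpl module.toList).2).dropLast).map String.ofList).length
      = (pvDots module.toList).length := by
    simp [pvDots_length]
  rw [pvALoop_eq _ _ hlen]
  rw [enum_dots module.toList 0]
  rw [← List.map_reverse, List.map_map]
  conv_rhs => rw [eq_range_map (pvDots module.toList), ← List.map_reverse, List.map_map]
  apply List.map_congr_left
  intro k hk
  rw [List.mem_reverse, List.mem_range] at hk
  simp only [Function.comp_apply]
  rw [← List.map_take]
  have hD : (((pvSpl module.toList).1 :: (pvSpl module.toList).2).dropLast).take (k+1)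
      = ((pvSpl module.toList).1 :: (pvSpl module.toList).2).take (k+1) := by
    rw [List.dropLast_eq_take, List.take_take]
    congr 1
    have := pvDots_length module.toList
    simp only [List.length_cons]
    omega
  rw [hD, join_map_ofList, join_take_dot module.toList k hk]
  simp [PySem.Str.slice, PySem.Chars.slice_eq_listSlice, PySem.List.slice_to_natCast]

-- ===== VERDICT (by name: the statement is the Claim_ definition above) =====
theorem get_module_ancestors_py_spec : Claim_equal_get_module_ancestors_py := by
  intro module _
  exact ports_eq module
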